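-- pv_equiv track=rewrite | github.com/bioneoficial/agent | agents/orchestrator.py | _is_perception_command
-- ===== SOURCE A (Python) =====
-- def _is_perception_command(request: str) -> bool:
--     """Check if request is a perception system command."""
--     if not request or not request.strip():
--         return False
--
--     cmd = request.strip().lower()
--     perception_commands = {
--         'a', 'accept', 'd', 'dismiss', 'l', 'list', 'h', 'help', 's', 'show'
--     }
--
--     # Single letter commands
--     if cmd in perception_commands:
--         return True
--
--     # Commands with arguments
--     cmd_prefixes = ['accept ', 'dismiss ', 'show ', 'a ', 'd ', 's ']
--     for prefix in cmd_prefixes: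
--         if cmd.startswith(prefix):
--             return True
--
--     return False
-- ===== SOURCE B (Python) =====
-- def _is_perception_command(request: str) -> bool:
--     """Check if request is a perception system command."""
--     cmd = request.strip().lower()
--     head, sep, _ = cmd.partition(' ')
--     return head in ('accept', 'dismiss', 'show', 'a', 'd', 's') or (
--         not sep and head in ('l', 'list', 'h', 'help'))
-- ===== Notes on version B (the rewrite author's own statement) =====
-- stated objective: simpler
-- what changed: B drops A's emptiness guard and its loop over six literal prefixes: it partitions the normalised command at the first space and decides with two literal-tuple membership tests on the first token (argument-taking commands always; list/help/l/h only when no argument follows), exploiting that the full command set is the union of the two.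
import Mathlib
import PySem

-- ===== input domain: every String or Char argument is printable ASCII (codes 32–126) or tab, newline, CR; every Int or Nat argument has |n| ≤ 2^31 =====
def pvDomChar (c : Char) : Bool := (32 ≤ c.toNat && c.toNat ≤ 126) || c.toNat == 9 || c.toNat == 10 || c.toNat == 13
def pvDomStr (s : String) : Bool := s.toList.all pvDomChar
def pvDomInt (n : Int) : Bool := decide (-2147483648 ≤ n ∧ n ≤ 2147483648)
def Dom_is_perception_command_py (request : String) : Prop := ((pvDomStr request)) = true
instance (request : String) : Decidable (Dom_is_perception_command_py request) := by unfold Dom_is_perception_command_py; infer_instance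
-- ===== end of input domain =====

-- B drops A's emptiness guard and prefix loop: it splits the first token off at the first
-- space and decides with two tuple-membership tests on that token (simpler decomposition).

set_option maxRecDepth 4096

-- ===== PORT A =====
def is_perception_command_py (request : String) : Bool :=
  if request == "" || PySem.Str.strip request == "" then false
  else
    let cmd := PySem.Str.lower (PySem.Str.strip request)
    if (["a", "accept", "d", "dismiss", "l", "list", "h", "help", "s", "show"] : List String).contains cmd then
      true
    else
      -- for prefix in cmd_prefixes: if cmd.startswith(prefix): return True / return False
      (["accept ", "dismiss ", "show ", "a ", "d ", "s "] : List String).any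
        (fun p => PySem.Str.startswith cmd p)

-- ===== PORT B =====
def is_perception_command_py_alt (request : String) : Bool :=
  let cmd := PySem.Str.lower (PySem.Str.strip request)
  -- head, sep, _ = cmd.partition(' ')  — ported by hand (exact): head is the part before
  -- the first space; `sep` is truthy iff a space occurs in cmd
  let head := String.ofList (cmd.toList.takeWhile (fun c => c ≠ ' '))
  let sep := !(cmd.toList.dropWhile (fun c => c ≠ ' ')).isEmpty
  -- `x in (t1, …, tk)` on a literal tuple is exactly the chain x == t1 or … or x == tk
  (head == "accept" || head == "dismiss" || head == "show" || head == "a" || head == "d" || head == "s")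
    || (!sep && (head == "l" || head == "list" || head == "h" || head == "help"))

-- ===== PRECONDITION & SPEC =====
def Spec_is_perception_command_py (request : String) (out : Bool) : Prop := out = is_perception_command_py_alt request
instance (request : String) (out : Bool) : Decidable (Spec_is_perception_command_py request out) := by unfold Spec_is_perception_command_py; infer_instance

-- ===== CLAIM (what is proved, stated in full; the proofs are below) =====
def Claim_equal_is_perception_command_py : Prop := ∀ (request : String), Dom_is_perception_command_py request → Spec_is_perception_command_py request (is_perception_command_py request)

-- ===== LEMMAS AND PROOFS =====

-- a word followed by a space is a prefix of head ++ ' ' :: rest (head, word space-free) iff word = head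
lemma prefix_word_space (w head rest : List Char)
    (hw : ∀ c ∈ w, c ≠ ' ') (hh : ∀ c ∈ head, c ≠ ' ') :
    ((w ++ [' ']) <+: (head ++ ' ' :: rest)) ↔ w = head := by
  induction w generalizing head with
  | nil =>
    cases head with
    | nil => simp
    | cons c t =>
      simp only [List.nil_append, List.cons_append]
      constructor
      · rintro ⟨s, hs⟩
        injection hs with h1 _
        exact absurd h1.symm (hh c (by simp))
      · intro h; exact absurd h (by simp)
  | cons a w' ih =>
    cases head with
    | nil =>
      simp only [List.cons_append, List.nil_append]
      constructor
      · rintro ⟨s, hs⟩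
        injection hs with h1 _
        exact absurd h1 (hw a (by simp))
      · intro h; exact absurd h (by simp)
    | cons c t =>
      simp only [List.cons_append, List.cons_prefix_cons]
      constructor
      · rintro ⟨h1, h2⟩
        have := (ih t (fun x hx => hw x (by simp [hx])) (fun x hx => hh x (by simp [hx]))).mp h2
        simp [h1, this]
      · rintro h
        injection h with h1 h2
        exact ⟨h1, (ih t (fun x hx => hw x (by simp [hx])) (fun x hx => hh x (by simp [hx]))).mpr h2⟩

-- the two decision procedures agree on every normalised command string cmd
lemma core_eq (cmd : String) :
    (if (["a", "accept", "d", "dismiss", "l", "list", "h", "help", "s", "show"] : List String).contains cmd then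
      true
     else
      (["accept ", "dismiss ", "show ", "a ", "d ", "s "] : List String).any
        (fun p => PySem.Str.startswith cmd p))
    =
    (let head := String.ofList (cmd.toList.takeWhile (fun c => c ≠ ' '))
     let sep := !(cmd.toList.dropWhile (fun c => c ≠ ' ')).isEmpty
     (head == "accept" || head == "dismiss" || head == "show" || head == "a" || head == "d" || head == "s")
       || (!sep && (head == "l" || head == "list" || head == "h" || head == "help"))) := by
  rcases h : cmd.toList.dropWhile (fun c => decide (c ≠ ' ')) with _ | ⟨c, rest⟩
  · -- no space in cmd: takeWhile keeps everything, head = cmd, every prefix test is false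
    have hall : ∀ x ∈ cmd.toList, x ≠ ' ' := by
      intro x hx
      have := List.dropWhile_eq_nil_iff.mp h x hx
      simpa using this
    have htake : cmd.toList.takeWhile (fun c => decide (c ≠ ' ')) = cmd.toList := by
      apply List.takeWhile_eq_self_iff.mpr
      intro x hx; simpa using hall x hx
    have hany : (["accept ", "dismiss ", "show ", "a ", "d ", "s "] : List String).any
        (fun p => PySem.Str.startswith cmd p) = false := by
      rw [List.any_eq_false]
      intro p hp
      rw [PySem.Str.startswith_eq]
      intro hb
      have hpref := (PySem.Chars.startswith_iff _ _).mp hb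
      have hsp : ' ' ∈ p.toList := by fin_cases hp <;> decide
      exact hall ' ' (hpref.subset hsp) rfl
    cases hcon : (["a", "accept", "d", "dismiss", "l", "list", "h", "help", "s", "show"] : List String).contains cmd with
    | true =>
      have hm := List.contains_iff_mem.mp hcon
      simp only [if_true, htake, String.ofList_toList, List.isEmpty_nil]
      rw [Bool.eq_iff_iff]
      constructor
      · intro _
        fin_cases hm <;> decide
      · intro _; rfl
    | false =>
      have hm : cmd ∉ (["a", "accept", "d", "dismiss", "l", "list", "h", "help", "s", "show"] : List String) := by
        intro hmem; rw [List.contains_iff_mem.mpr hmem] at hcon; exact Bool.true_eq_false.mp hcon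
      simp only [List.mem_cons, List.not_mem_nil, not_or] at hm
      obtain ⟨n1, n2, n3, n4, n5, n6, n7, n8, n9, n10, -⟩ := hm
      simp only [Bool.false_eq_true, if_false, hany, htake, String.ofList_toList,
        List.isEmpty_nil]
      rw [Bool.eq_iff_iff]
      simp [n1, n2, n3, n4, n5, n6, n7, n8, n9, n10]
  · -- first space found: cmd = head ++ ' ' :: rest with head space-free; sep is truthy
    have hw : cmd.toList.dropWhile (fun ch => decide (ch ≠ ' ')) ≠ [] := by
      rw [h]; simp
    have hc : c = ' ' := by
      have hnot := List.head_dropWhile_not (fun ch => decide (ch ≠ ' ')) hw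
      simp only [h, List.head_cons] at hnot
      simpa using hnot
    subst hc
    have hcmd : cmd.toList = cmd.toList.takeWhile (fun ch => decide (ch ≠ ' ')) ++ ' ' :: rest := by
      conv_lhs => rw [← List.takeWhile_append_dropWhile (p := fun ch => decide (ch ≠ ' '))
        (l := cmd.toList)]
      rw [h]
    have hh : ∀ x ∈ cmd.toList.takeWhile (fun ch => decide (ch ≠ ' ')), x ≠ ' ' := by
      intro x hx
      simpa using List.mem_takeWhile_imp hx
    have hsp : ' ' ∈ cmd.toList := by rw [hcmd]; simp
    have hnotfull :
        (["a", "accept", "d", "dismiss", "l", "list", "h", "help", "s", "show"] : List String).contains cmd = false := by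
      cases hcon : (["a", "accept", "d", "dismiss", "l", "list", "h", "help", "s", "show"] : List String).contains cmd
      · rfl
      · have hmem := List.contains_iff_mem.mp hcon
        fin_cases hmem <;> exact absurd hsp (by decide)
    have hsw : ∀ (wstr : String), (∀ ch ∈ wstr.toList, ch ≠ ' ') →
        (PySem.Chars.startswith cmd.toList (wstr.toList ++ [' ']) = true ↔
          wstr.toList = cmd.toList.takeWhile (fun ch => decide (ch ≠ ' '))) := by
      intro wstr hwf
      rw [PySem.Chars.startswith_iff]
      conv_lhs => rw [hcmd]
      exact prefix_word_space _ _ _ hwf hh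
    have emk : ∀ (wstr : String),
        ((String.ofList (cmd.toList.takeWhile (fun ch => decide (ch ≠ ' '))) == wstr) = true ↔
          wstr.toList = cmd.toList.takeWhile (fun ch => decide (ch ≠ ' '))) := by
      intro wstr
      rw [beq_iff_eq]
      constructor
      · intro hx; rw [← hx, String.toList_ofList]
      · intro hx; rw [← hx, String.ofList_toList]
    have w1 : ∀ ch ∈ ("accept" : String).toList, ch ≠ ' ' := by simp
    have w2 : ∀ ch ∈ ("dismiss" : String).toList, ch ≠ ' ' := by simp
    have w3 : ∀ ch ∈ ("show" : String).toList, ch ≠ ' ' := by simp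
    have w4 : ∀ ch ∈ ("a" : String).toList, ch ≠ ' ' := by simp
    have w5 : ∀ ch ∈ ("d" : String).toList, ch ≠ ' ' := by simp
    have w6 : ∀ ch ∈ ("s" : String).toList, ch ≠ ' ' := by simp
    have e1 : ("accept " : String).toList = ("accept" : String).toList ++ [' '] := rfl
    have e2 : ("dismiss " : String).toList = ("dismiss" : String).toList ++ [' '] := rfl
    have e3 : ("show " : String).toList = ("show" : String).toList ++ [' '] := rfl
    have e4 : ("a " : String).toList = ("a" : String).toList ++ [' '] := rfl
    have e5 : ("d " : String).toList = ("d" : String).toList ++ [' '] := rfl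
    have e6 : ("s " : String).toList = ("s" : String).toList ++ [' '] := rfl
    simp only [hnotfull, Bool.false_eq_true, if_false, List.isEmpty_cons, Bool.not_false,
      Bool.not_true, Bool.false_and, Bool.or_false]
    rw [Bool.eq_iff_iff]
    simp only [List.any_cons, List.any_nil, Bool.or_eq_true, Bool.false_eq_true, or_false,
      PySem.Str.startswith_eq, e1, e2, e3, e4, e5, e6, hsw "accept" w1, hsw "dismiss" w2,
      hsw "show" w3, hsw "a" w4, hsw "d" w5, hsw "s" w6, emk]
    simp only [or_assoc]

-- when the guard fires, cmd normalises to "" and B also answers false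
lemma alt_empty_strip (request : String) (hs : PySem.Str.strip request = "") :
    is_perception_command_py_alt request = false := by
  unfold is_perception_command_py_alt
  rw [hs]
  decide

-- ===== VERDICT (by name: the statement is the Claim_ definition above) =====
theorem is_perception_command_py_spec : Claim_equal_is_perception_command_py := by
  intro request _
  unfold Spec_is_perception_command_py
  unfold is_perception_command_py
  split
  · next hg =>
    rcases Bool.or_eq_true_iff.mp hg with h' | h'
    · have : request = "" := by simpa using h'
      subst this
      decide
    · exact (alt_empty_strip request (by simpa using h')).symm
  · exact core_eq _
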